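-- pv_equiv track=rewrite | github.com/ashghost1027/ZBreaker | ProblemsForTodaysClass.py | replace_with_hyphen
-- ===== SOURCE A (Python) =====
-- def replace_with_hyphen(string):
--     strings=""
--     for i in string:
--         if i == " ":
--             strings+="-"
--         else:
--             strings+=i
--     return strings
-- ===== SOURCE B (Python) =====
-- def replace_with_hyphen(string):
--     return "-".join(string.split(" "))
-- ===== Notes on version B (the rewrite author's own statement) =====
-- stated objective: faster
-- what changed: Replaces the per-character loop with repeated string concatenation by a single split on the space separator rejoined with hyphens via str.join.
import Mathlib
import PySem

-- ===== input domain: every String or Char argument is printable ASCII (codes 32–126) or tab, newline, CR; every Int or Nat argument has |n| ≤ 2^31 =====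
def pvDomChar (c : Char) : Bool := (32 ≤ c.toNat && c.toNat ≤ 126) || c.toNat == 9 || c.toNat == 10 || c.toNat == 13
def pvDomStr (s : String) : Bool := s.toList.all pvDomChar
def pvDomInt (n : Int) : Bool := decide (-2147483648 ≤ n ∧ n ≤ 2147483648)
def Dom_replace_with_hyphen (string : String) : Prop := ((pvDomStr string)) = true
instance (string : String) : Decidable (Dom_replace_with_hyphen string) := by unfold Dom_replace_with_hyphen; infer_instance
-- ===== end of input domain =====

-- B replaces A's per-character scan-and-append with split(" ") followed by "-".join (idiomatic).


-- ===== PORT A =====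
-- strings = ""; for i in string: strings += "-" if i == " " else i; return strings
def replace_with_hyphen (string : String) : String :=
  String.ofList
    (string.toList.foldl (fun strings i => strings ++ [if i == ' ' then '-' else i]) [])

-- ===== PORT B =====
-- return "-".join(string.split(" "))  (Chars.splitOn is PySem's s.split(sep) for sep ≠ "")
def replace_with_hyphen_alt (string : String) : String :=
  PySem.Str.join "-" ((PySem.Chars.splitOn string.toList [' ']).map String.ofList)

-- ===== PRECONDITION & SPEC =====
def Spec_replace_with_hyphen (string : String) (out : String) : Prop := out = replace_with_hyphen_alt string
instance (string : String) (out : String) : Decidable (Spec_replace_with_hyphen string out) := by unfold Spec_replace_with_hyphen; infer_instance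

-- ===== CLAIM (what is proved, stated in full; the proofs are below) =====
def Claim_equal_replace_with_hyphen : Prop := ∀ (string : String), Dom_replace_with_hyphen string → Spec_replace_with_hyphen string (replace_with_hyphen string)

-- ===== LEMMAS AND PROOFS =====

def pvHyph (c : Char) : Char := if c == ' ' then '-' else c

theorem pv_split_cons (c : Char) (rest : List Char) :
    List.splitOn ' ' (c :: rest)
      = if c = ' ' then [] :: rest.splitOn ' '
        else (rest.splitOn ' ').modifyHead (c :: ·) := by
  by_cases hc : c = ' ' <;>
    simp [hc, List.splitOn, List.splitOnP_cons, List.modifyHead]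

theorem pv_intercalate_cons_cons (s x y : List Char) (xs : List (List Char)) :
    List.intercalate s (x :: y :: xs) = x ++ s ++ List.intercalate s (y :: xs) := by
  simp [List.intercalate, List.intersperse]

theorem pv_foldA (cs : List Char) (acc : List Char) :
    cs.foldl (fun strings i => strings ++ [if i == ' ' then '-' else i]) acc
      = acc ++ cs.map pvHyph := by
  induction cs generalizing acc with
  | nil => simp
  | cons c rest ih =>
    rw [List.foldl_cons, ih]
    simp [pvHyph, List.append_assoc]

theorem pv_go_spec (l : List Char) (cur : List Char) (acc : List (List Char)) (fuel : Nat)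
    (h : l.length < fuel) :
    PySem.Chars.splitOn.go [' '] fuel l cur acc
      = acc.reverse ++ (l.splitOn ' ').modifyHead (cur.reverse ++ ·) := by
  induction l generalizing cur acc fuel with
  | nil =>
    cases fuel with
    | zero => omega
    | succ n => rw [PySem.Chars.splitOn.go.eq_def]; simp [List.splitOn]
  | cons c rest ih =>
    cases fuel with
    | zero => omega
    | succ n =>
      have hn : rest.length < n := by simpa using Nat.lt_of_succ_lt_succ h
      have hne : rest.splitOn ' ' ≠ [] := List.splitOnP_ne_nil _ rest
      obtain ⟨hd, tl, he⟩ := List.exists_cons_of_ne_nil hne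
      rw [PySem.Chars.splitOn.go.eq_def]
      simp only [List.isPrefixOf, Bool.and_true]
      by_cases hc : c = ' '
      · subst hc
        simp only [beq_self_eq_true, if_pos, List.length_cons, List.length_nil,
          List.drop_succ_cons, List.drop_zero]
        rw [ih [] (cur.reverse :: acc) n hn, pv_split_cons, if_pos rfl, he]
        simp only [List.reverse_cons, List.reverse_nil, List.nil_append,
          List.modifyHead, List.append_assoc, List.cons_append, List.append_nil]
      · have hb : (' ' == c) = false := beq_false_of_ne (fun h => hc h.symm)
        simp only [hb, Bool.false_eq_true, if_neg, not_false_iff]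
        rw [ih (c :: cur) acc n hn, pv_split_cons, if_neg hc, he]
        simp only [List.modifyHead, List.reverse_cons, List.append_assoc,
          List.cons_append, List.nil_append]

theorem pv_inter (cs : List Char) :
    List.intercalate ['-'] (cs.splitOn ' ') = cs.map pvHyph := by
  induction cs with
  | nil => simp [List.splitOn, List.intercalate]
  | cons c rest ih =>
    have hne : rest.splitOn ' ' ≠ [] := List.splitOnP_ne_nil _ rest
    obtain ⟨hd, tl, he⟩ := List.exists_cons_of_ne_nil hne
    rw [pv_split_cons]
    by_cases hc : c = ' '
    · rw [if_pos hc, he, pv_intercalate_cons_cons]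
      have h1 : List.map pvHyph rest = List.intercalate ['-'] (hd :: tl) := by
        rw [← ih, he]
      simp [h1, pvHyph, hc]
    · rw [if_neg hc, he, List.modifyHead]
      cases tl with
      | nil =>
        have h1 : List.map pvHyph rest = hd := by
          rw [← ih, he]; simp [List.intercalate]
        simp [List.map_cons, h1, pvHyph, hc, List.intercalate]
      | cons t ts =>
        have h1 : List.map pvHyph rest = hd ++ ['-'] ++ List.intercalate ['-'] (t :: ts) := by
          rw [← ih, he, pv_intercalate_cons_cons]
        rw [pv_intercalate_cons_cons]
        simp [List.map_cons, h1, pvHyph, hc, List.append_assoc]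

-- ===== VERDICT (by name: the statement is the Claim_ definition above) =====
theorem replace_with_hyphen_spec : Claim_equal_replace_with_hyphen := by
  intro s _
  unfold Spec_replace_with_hyphen replace_with_hyphen replace_with_hyphen_alt
  rw [pv_foldA]
  unfold PySem.Str.join PySem.Chars.join PySem.Chars.splitOn
  rw [pv_go_spec s.toList [] [] (s.toList.length + 1) (by omega)]
  have hm : List.modifyHead (fun x => [].reverse ++ x) (List.splitOn ' ' s.toList)
      = List.splitOn ' ' s.toList := by
    cases List.splitOn ' ' s.toList <;> simp
  rw [hm, List.map_map]
  have hid : (String.toList ∘ String.ofList) = (id : List Char → List Char) := by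
    funext l; simp [Function.comp, String.toList_ofList]
  rw [hid, List.map_id]
  have h2 : "-".toList = ['-'] := rfl
  simp only [List.reverse_nil, List.nil_append, h2, pv_inter]
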